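-- pv_equiv track=rewrite | github.com/actually-useful-ai/aivia | artifact/scripts/WORKING/to_test/analyze_content_gaps.py | match_required_sections
-- ===== SOURCE A (Python) =====
-- from typing import Dict, List, Tuple, Any
--
-- REQUIRED_SECTIONS = [
--     "Quick Reference",
--     "Medical Coding",
--     "Introduction",
--     "Epidemiology and Demographics",
--     "Etiology and Pathophysiology",
--     "Clinical Features",
--     "Diagnosis",
--     "Assistive Technology and AAC Interventions",
--     "Clinical Recommendations",
--     "Care Management",
--     "Educational Support",
--     "Transition Planning",
--     "Support and Resources",
--     "References"
-- ]
--
-- SECTION_ALIASES = {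
--     "Quick Reference": ["quick reference", "quick facts"],
--     "Medical Coding": ["medical coding", "medical codes", "diagnostic codes"],
--     "Introduction": ["introduction"],
--     "Epidemiology and Demographics": ["epidemiology", "demographics", "epidemiology and demographics"],
--     "Etiology and Pathophysiology": ["etiology", "pathophysiology", "etiology and pathophysiology"],
--     "Clinical Features": ["clinical features", "symptoms", "clinical presentation"],
--     "Diagnosis": ["diagnosis", "diagnostic criteria"],
--     "Assistive Technology and AAC Interventions": ["assistive technology", "aac", "aac interventions"],
--     "Clinical Recommendations": ["clinical recommendations", "recommendations"],
--     "Care Management": ["care management", "management", "treatment"],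
--     "Educational Support": ["educational support", "education", "iep"],
--     "Transition Planning": ["transition planning", "transition"],
--     "Support and Resources": ["support", "resources", "support and resources"],
--     "References": ["references", "bibliography", "citations"]
-- }
--
-- def match_required_sections(found_sections: Dict[str, Dict]) -> Tuple[List[str], List[str], Dict[str, int]]:
--     """Match found sections against required sections"""
--     present = []
--     missing = []
--     short_sections = {}
--
--     for required in REQUIRED_SECTIONS:
--         matched = False
--         aliases = SECTION_ALIASES.get(required, [required.lower()])
--
--         for found_title, found_data in found_sections.items():
--             found_lower = found_title.lower()
--             if any(alias in found_lower for alias in aliases):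
--                 present.append(required)
--                 matched = True
--
--                 # Check if section is underdeveloped
--                 if found_data["word_count"] < 100:
--                     short_sections[required] = found_data["word_count"]
--                 break
--
--         if not matched:
--             missing.append(required)
--
--     return present, missing, short_sections
-- ===== SOURCE B (Python) =====
-- REQUIRED_SECTIONS = [
--     "Quick Reference",
--     "Medical Coding",
--     "Introduction",
--     "Epidemiology and Demographics",
--     "Etiology and Pathophysiology",
--     "Clinical Features",
--     "Diagnosis",
--     "Assistive Technology and AAC Interventions",
--     "Clinical Recommendations",
--     "Care Management",
--     "Educational Support",
--     "Transition Planning",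
--     "Support and Resources",
--     "References"
-- ]
--
-- SECTION_ALIASES = {
--     "Quick Reference": ["quick reference", "quick facts"],
--     "Medical Coding": ["medical coding", "medical codes", "diagnostic codes"],
--     "Introduction": ["introduction"],
--     "Epidemiology and Demographics": ["epidemiology", "demographics", "epidemiology and demographics"],
--     "Etiology and Pathophysiology": ["etiology", "pathophysiology", "etiology and pathophysiology"],
--     "Clinical Features": ["clinical features", "symptoms", "clinical presentation"],
--     "Diagnosis": ["diagnosis", "diagnostic criteria"],
--     "Assistive Technology and AAC Interventions": ["assistive technology", "aac", "aac interventions"],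
--     "Clinical Recommendations": ["clinical recommendations", "recommendations"],
--     "Care Management": ["care management", "management", "treatment"],
--     "Educational Support": ["educational support", "education", "iep"],
--     "Transition Planning": ["transition planning", "transition"],
--     "Support and Resources": ["support", "resources", "support and resources"],
--     "References": ["references", "bibliography", "citations"]
-- }
--
-- def match_required_sections(found_sections):
--     """Match found sections against required sections (single pass over found_sections)."""
--     matched = {}
--     for found_title, found_data in found_sections.items():
--         found_lower = found_title.lower()
--         for required, aliases in SECTION_ALIASES.items():
--             if required not in matched and any(alias in found_lower for alias in aliases):
--                 matched[required] = found_data["word_count"]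
--
--     present = []
--     missing = []
--     short_sections = {}
--     for required in REQUIRED_SECTIONS:
--         if required in matched:
--             present.append(required)
--             if matched[required] < 100:
--                 short_sections[required] = matched[required]
--         else:
--             missing.append(required)
--     return present, missing, short_sections
-- ===== Notes on version B (the rewrite author's own statement) =====
-- stated objective: alternative
-- what changed: B makes one pass over found_sections building a first-match table required->word_count (instead of A's per-required rescan of found_sections with break), then derives present/missing/short_sections in a single loop over REQUIRED_SECTIONS.
import Mathlib
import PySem

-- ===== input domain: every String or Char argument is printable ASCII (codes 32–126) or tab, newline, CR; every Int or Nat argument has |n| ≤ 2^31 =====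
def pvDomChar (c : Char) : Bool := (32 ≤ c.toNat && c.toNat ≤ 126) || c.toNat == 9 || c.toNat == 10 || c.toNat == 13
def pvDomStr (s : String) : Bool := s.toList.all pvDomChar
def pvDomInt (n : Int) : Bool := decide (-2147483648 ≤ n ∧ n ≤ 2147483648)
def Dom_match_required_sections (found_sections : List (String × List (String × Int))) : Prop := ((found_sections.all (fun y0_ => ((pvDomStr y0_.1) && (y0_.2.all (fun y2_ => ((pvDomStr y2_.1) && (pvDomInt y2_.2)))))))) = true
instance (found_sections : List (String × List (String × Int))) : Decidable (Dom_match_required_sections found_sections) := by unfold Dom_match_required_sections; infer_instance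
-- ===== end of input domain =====

-- B replaces A's per-required rescan of found_sections by ONE pass over found_sections that
-- builds a first-match table required -> word_count, from which present/missing/short are read off
-- (alternative decomposition, same cost). Equivalence is about the RETURN value; neither mutates.

-- ===== PORT A =====
-- shared module constants
def pvRequiredSections : List String :=
  ["Quick Reference", "Medical Coding", "Introduction", "Epidemiology and Demographics",
   "Etiology and Pathophysiology", "Clinical Features", "Diagnosis",
   "Assistive Technology and AAC Interventions", "Clinical Recommendations", "Care Management",
   "Educational Support", "Transition Planning", "Support and Resources", "References"]

def pvSectionAliases : List (String × List String) :=
  [("Quick Reference", ["quick reference", "quick facts"]),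
   ("Medical Coding", ["medical coding", "medical codes", "diagnostic codes"]),
   ("Introduction", ["introduction"]),
   ("Epidemiology and Demographics", ["epidemiology", "demographics", "epidemiology and demographics"]),
   ("Etiology and Pathophysiology", ["etiology", "pathophysiology", "etiology and pathophysiology"]),
   ("Clinical Features", ["clinical features", "symptoms", "clinical presentation"]),
   ("Diagnosis", ["diagnosis", "diagnostic criteria"]),
   ("Assistive Technology and AAC Interventions", ["assistive technology", "aac", "aac interventions"]),
   ("Clinical Recommendations", ["clinical recommendations", "recommendations"]),
   ("Care Management", ["care management", "management", "treatment"]),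
   ("Educational Support", ["educational support", "education", "iep"]),
   ("Transition Planning", ["transition planning", "transition"]),
   ("Support and Resources", ["support", "resources", "support and resources"]),
   ("References", ["references", "bibliography", "citations"])]

-- any(alias in found_lower for alias in aliases)
def pvAliasHit (aliases : List String) (foundLower : String) : Bool :=
  aliases.any (fun a => PySem.Str.isIn a foundLower)

-- found_data["word_count"]; .getD 0 is reached only where Python raises KeyError (excluded by Pre_)
def pvWordCount (d : List (String × Int)) : Int :=
  ((PySem.Dict.mk d).get? "word_count").getD 0

-- A's inner 'for found_title, found_data in found_sections.items(): … break':
-- word_count of the first found whose lowered title contains an alias, none if no match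
def pvFindA (aliases : List String) : List (String × List (String × Int)) → Option Int
  | [] => none
  | (t, d) :: rest =>
    if pvAliasHit aliases (PySem.Str.lower t) then some (pvWordCount d)
    else pvFindA aliases rest

def match_required_sections (found_sections : List (String × List (String × Int))) :
    List String × List String × (List (String × Int)) :=
  pvRequiredSections.foldl
    (fun st required =>
      let aliases := (PySem.Dict.mk pvSectionAliases).getD required [PySem.Str.lower required]
      match pvFindA aliases found_sections with
      | some wc =>
          (st.1 ++ [required], st.2.1, if wc < 100 then st.2.2 ++ [(required, wc)] else st.2.2)
      | none => (st.1, st.2.1 ++ [required], st.2.2))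
    ([], [], [])

-- ===== PORT B =====
-- one found title against every required: insert only where not already matched
def pvStepB (foundLower : String) (wc : Int) (m : PySem.Dict String Int) : PySem.Dict String Int :=
  pvSectionAliases.foldl
    (fun m' ra => if (m'.get? ra.1).isNone && pvAliasHit ra.2 foundLower then m'.insert ra.1 wc else m')
    m

-- the single pass over found_sections building matched : required -> word_count of first match
def pvBuild (found_sections : List (String × List (String × Int))) : PySem.Dict String Int :=
  found_sections.foldl
    (fun m td => pvStepB (PySem.Str.lower td.1) (pvWordCount td.2) m)
    PySem.Dict.empty

def match_required_sections_alt (found_sections : List (String × List (String × Int))) :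
    List String × List String × (List (String × Int)) :=
  let matched := pvBuild found_sections
  pvRequiredSections.foldl
    (fun st required =>
      match matched.get? required with
      | some wc =>
          (st.1 ++ [required], st.2.1, if wc < 100 then st.2.2 ++ [(required, wc)] else st.2.2)
      | none => (st.1, st.2.1 ++ [required], st.2.2))
    ([], [], [])

-- ===== PRECONDITION & SPEC =====
-- the lowered title contains an alias of some required (the titles A may read word_count from)
def pvAnyAliasHit (foundLower : String) : Bool :=
  pvSectionAliases.any (fun ra => pvAliasHit ra.2 foundLower)

-- Pre_ excludes (a) dicts given with duplicate outer or inner keys, on which the Python dict view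
-- collapses entries (last value wins) and the assoc-list reading is ambiguous, and (b) inputs where
-- some alias-matching found section lacks a "word_count" key: there A raises KeyError whenever that
-- section is the first match for some required, and otherwise which entries may lack the key is an
-- accident of scan order.
def Pre_match_required_sections (found_sections : List (String × List (String × Int))) : Prop :=
  (found_sections.map Prod.fst).Nodup ∧
  ∀ p ∈ found_sections,
    (p.2.map Prod.fst).Nodup ∧
    (pvAnyAliasHit (PySem.Str.lower p.1) = true → "word_count" ∈ p.2.map Prod.fst)
instance (found_sections : List (String × List (String × Int))) : Decidable (Pre_match_required_sections found_sections) := by unfold Pre_match_required_sections; infer_instance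

def pvWitness_match_required_sections : (List (String × List (String × Int))) :=
  [("Introduction and Symptoms", [("word_count", 42)]), ("notes", [("n", 1)])]

def Spec_match_required_sections (found_sections : List (String × List (String × Int))) (out : List String × List String × (List (String × Int))) : Prop := out = match_required_sections_alt found_sections
instance (found_sections : List (String × List (String × Int))) (out : List String × List String × (List (String × Int))) : Decidable (Spec_match_required_sections found_sections out) := by unfold Spec_match_required_sections; infer_instance

-- ===== CLAIM (what is proved, stated in full; the proofs are below) =====
def Claim_equal_match_required_sections : Prop := ∀ (found_sections : List (String × List (String × Int))), Dom_match_required_sections found_sections → Pre_match_required_sections found_sections → Spec_match_required_sections found_sections (match_required_sections found_sections)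

-- ===== LEMMAS AND PROOFS =====

-- an insert-if-absent fold over an alias table leaves keys outside the table untouched
theorem pvFold_get?_not_mem (L : List (String × List String)) (tl : String) (wc : Int)
    (m : PySem.Dict String Int) (r : String) (hr : r ∉ L.map Prod.fst) :
    (L.foldl (fun m' ra => if (m'.get? ra.1).isNone && pvAliasHit ra.2 tl then m'.insert ra.1 wc else m') m).get? r
      = m.get? r := by
  induction L generalizing m with
  | nil => rfl
  | cons hd tlst ih =>
    simp only [List.map_cons, List.mem_cons, not_or] at hr
    simp only [List.foldl_cons]
    rw [ih _ hr.2]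
    split
    · exact PySem.Dict.get?_insert_of_ne _ _ hr.1
    · rfl

-- effect of one pvStepB-shaped fold on a key r that the alias table maps to al
theorem pvFold_get?_hit (L : List (String × List String)) (hnd : (L.map Prod.fst).Nodup)
    (tl : String) (wc : Int) (m : PySem.Dict String Int) (r : String) (al : List String)
    (h : (PySem.Dict.mk L).get? r = some al) :
    (L.foldl (fun m' ra => if (m'.get? ra.1).isNone && pvAliasHit ra.2 tl then m'.insert ra.1 wc else m') m).get? r
      = if (m.get? r).isNone && pvAliasHit al tl then some wc else m.get? r := by
  induction L generalizing m with
  | nil => simp [PySem.Dict.get?] at h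
  | cons hd tlst ih =>
    obtain ⟨k, as⟩ := hd
    rw [PySem.Dict.get?_mk_cons] at h
    simp only [List.map_cons, List.nodup_cons] at hnd
    by_cases hk : k = r
    · subst hk
      simp only [BEq.rfl] at h
      obtain rfl : as = al := by injection h
      simp only [List.foldl_cons]
      rw [pvFold_get?_not_mem _ _ _ _ _ hnd.1]
      split
      · simp [PySem.Dict.get?_insert_self]
      · rfl
    · rw [if_neg (by simpa using fun hh => hk (by simpa using hh))] at h
      simp only [List.foldl_cons]
      rw [ih hnd.2 _ h]
      split
      · next hcond =>
        rw [PySem.Dict.get?_insert_of_ne _ _ (fun hrk => hk hrk.symm)]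
      · rfl

theorem pvSectionAliases_nodup : (pvSectionAliases.map Prod.fst).Nodup := by decide

-- the single pass computes, at each aliased key, exactly A's first-match scan
theorem pvBuild_invariant (fs : List (String × List (String × Int)))
    (m : PySem.Dict String Int) (r : String) (al : List String)
    (h : (PySem.Dict.mk pvSectionAliases).get? r = some al) :
    (fs.foldl (fun m td => pvStepB (PySem.Str.lower td.1) (pvWordCount td.2) m) m).get? r
      = (m.get? r).or (pvFindA al fs) := by
  induction fs generalizing m with
  | nil => cases hm : m.get? r <;> simp [pvFindA, hm]
  | cons td rest ih =>
    obtain ⟨t, d⟩ := td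
    simp only [List.foldl_cons]
    rw [ih]
    unfold pvStepB
    rw [pvFold_get?_hit _ pvSectionAliases_nodup _ _ _ _ _ h]
    simp only [pvFindA]
    cases hm : m.get? r <;> cases hhit : pvAliasHit al (PySem.Str.lower t) <;> simp_all

theorem pvBuild_get? (fs : List (String × List (String × Int))) (r : String) (al : List String)
    (h : (PySem.Dict.mk pvSectionAliases).get? r = some al) :
    (pvBuild fs).get? r = pvFindA al fs := by
  unfold pvBuild
  rw [pvBuild_invariant fs _ r al h]
  simp [PySem.Dict.get?_empty]

-- the two per-required output steps coincide for any aliased required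
theorem pvStep_eq (fs : List (String × List (String × Int))) (r : String)
    (h : ((PySem.Dict.mk pvSectionAliases).get? r).isSome)
    (st : List String × List String × (List (String × Int))) :
    (match pvFindA ((PySem.Dict.mk pvSectionAliases).getD r [PySem.Str.lower r]) fs with
     | some wc => (st.1 ++ [r], st.2.1, if wc < 100 then st.2.2 ++ [(r, wc)] else st.2.2)
     | none => (st.1, st.2.1 ++ [r], st.2.2))
    = (match (pvBuild fs).get? r with
       | some wc => (st.1 ++ [r], st.2.1, if wc < 100 then st.2.2 ++ [(r, wc)] else st.2.2)
       | none => (st.1, st.2.1 ++ [r], st.2.2)) := by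
  obtain ⟨al, hal⟩ := Option.isSome_iff_exists.mp h
  rw [pvBuild_get? fs r al hal, PySem.Dict.getD_eq_get?_getD, hal]
  rfl

theorem pvAll_required_aliased :
    ∀ r ∈ pvRequiredSections, ((PySem.Dict.mk pvSectionAliases).get? r).isSome := by decide

-- ===== VERDICT (by name: the statement is the Claim_ definition above) =====
theorem match_required_sections_spec : Claim_equal_match_required_sections := by
  intro fs _hdom _hpre
  unfold Spec_match_required_sections match_required_sections match_required_sections_alt
  exact PySem.List.foldl_congr_mem _ _ _ _ (fun st r hr => pvStep_eq fs r (pvAll_required_aliased r hr) st)
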